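-- pv_equiv track=rewrite | github.com/Galisateesh/GaliPython | string_different_types_of_operations.py | Eveodd
-- ===== SOURCE A (Python) =====
-- def Eveodd(a):
--     e=''
--     o=''
--     for i in range(len(a)):
--         if i%2==0 and a[i]!=' ':
--             e=e+a[i]
--         elif i%2==1 and a[i]!=' ':
--             o=o+a[i]
--     return e,o
-- ===== SOURCE B (Python) =====
-- def Eveodd(a):
--     e = []
--     o = []
--     it = iter(a)
--     for c in it:
--         if c != ' ':
--             e.append(c)
--         d = next(it, None)
--         if d is not None and d != ' ':
--             o.append(d)
--     return ''.join(e), ''.join(o)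
-- ===== Notes on version B (the rewrite author's own statement) =====
-- stated objective: simpler
-- what changed: Replaces the indexed loop with its i%2 parity test by an iterator that consumes the string two characters at a time (even char, then odd char), appending non-space chars to two lists joined at the end.
import Mathlib
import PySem

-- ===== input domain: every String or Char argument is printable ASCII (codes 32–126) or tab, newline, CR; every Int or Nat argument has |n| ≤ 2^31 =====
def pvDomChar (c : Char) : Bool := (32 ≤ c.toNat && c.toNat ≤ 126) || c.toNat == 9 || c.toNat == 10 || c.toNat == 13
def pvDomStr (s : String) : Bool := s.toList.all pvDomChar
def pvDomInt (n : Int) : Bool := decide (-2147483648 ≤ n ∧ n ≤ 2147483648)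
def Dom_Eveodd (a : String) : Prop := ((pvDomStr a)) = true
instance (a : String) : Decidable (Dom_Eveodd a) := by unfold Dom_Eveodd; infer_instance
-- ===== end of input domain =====

-- B replaces A's indexed loop with parity test by an iterator consuming two characters
-- (even, odd) at a time into two accumulator lists; same return value, clearer structure.

-- ===== PORT A =====
def Eveodd (a : String) : String × String :=
  let l := a.toList
  (PySem.List.pyRange 0 (l.length : Int) 1).foldl
    (fun (st : String × String) i =>
      if PySem.Int.mod i 2 = 0 ∧ PySem.List.pyGetD l i ' ' ≠ ' ' then
        (st.1.push (PySem.List.pyGetD l i ' '), st.2)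
      else if PySem.Int.mod i 2 = 1 ∧ PySem.List.pyGetD l i ' ' ≠ ' ' then
        (st.1, st.2.push (PySem.List.pyGetD l i ' '))
      else st)
    ("", "")

-- ===== PORT B =====
-- B's for-loop over the pair iterator: structural recursion taking two chars per step,
-- carrying the two accumulator lists e, o (appended at the back, as list.append does).
def evoLoop : List Char → List Char → List Char → List Char × List Char
  | [], e, o => (e, o)
  | [c], e, o => ((if c ≠ ' ' then e ++ [c] else e), o)
  | c :: d :: rest, e, o =>
      evoLoop rest (if c ≠ ' ' then e ++ [c] else e) (if d ≠ ' ' then o ++ [d] else o)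

def Eveodd_alt (a : String) : String × String :=
  let r := evoLoop a.toList [] []
  (String.ofList r.1, String.ofList r.2)

-- ===== PRECONDITION & SPEC =====
def Spec_Eveodd (a : String) (out : String × String) : Prop := out = Eveodd_alt a
instance (a : String) (out : String × String) : Decidable (Spec_Eveodd a out) := by unfold Spec_Eveodd; infer_instance

-- ===== CLAIM (what is proved, stated in full; the proofs are below) =====
def Claim_equal_Eveodd : Prop := ∀ (a : String), Dom_Eveodd a → Spec_Eveodd a (Eveodd a)

-- ===== LEMMAS AND PROOFS =====

-- Accumulator-free reference: even-index and odd-index non-space characters.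
def evoP : List Char → List Char × List Char
  | [] => ([], [])
  | [c] => ((if c ≠ ' ' then [c] else []), [])
  | c :: d :: rest =>
      ((if c ≠ ' ' then [c] else []) ++ (evoP rest).1,
       (if d ≠ ' ' then [d] else []) ++ (evoP rest).2)

theorem evoLoop_eq (l e o) : evoLoop l e o = (e ++ (evoP l).1, o ++ (evoP l).2) := by
  induction l using evoP.induct generalizing e o with
  | case1 => simp [evoLoop, evoP]
  | case2 c => by_cases h : c = ' ' <;> simp [evoLoop, evoP, h]
  | case3 c d rest ih =>
      simp only [evoLoop, evoP, ih]
      by_cases h1 : c = ' ' <;> by_cases h2 : d = ' ' <;> simp [h1, h2]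

theorem evoP_snoc (l : List Char) (c : Char) :
    evoP (l ++ [c]) =
      if l.length % 2 = 0 then
        ((evoP l).1 ++ (if c ≠ ' ' then [c] else []), (evoP l).2)
      else
        ((evoP l).1, (evoP l).2 ++ (if c ≠ ' ' then [c] else [])) := by
  induction l using evoP.induct with
  | case1 => by_cases h : c = ' ' <;> simp [evoP, h]
  | case2 d => by_cases h : c = ' ' <;> simp [evoP, h]
  | case3 x y rest ih =>
      have hlen : (x :: y :: rest).length % 2 = rest.length % 2 := by
        simp [List.length_cons]; omega
      simp only [List.cons_append, evoP, ih, hlen]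
      by_cases h : rest.length % 2 = 0 <;> simp [h]

theorem mod_cast_two (n : ℕ) : PySem.Int.mod (n : ℤ) 2 = ((n % 2 : ℕ) : ℤ) := by
  simp [PySem.Int.mod, Int.fmod_eq_emod]

theorem foldA_eq (l : List Char) :
    (PySem.List.pyRange 0 (l.length : Int) 1).foldl
      (fun (st : String × String) i =>
        if PySem.Int.mod i 2 = 0 ∧ PySem.List.pyGetD l i ' ' ≠ ' ' then
          (st.1.push (PySem.List.pyGetD l i ' '), st.2)
        else if PySem.Int.mod i 2 = 1 ∧ PySem.List.pyGetD l i ' ' ≠ ' ' then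
          (st.1, st.2.push (PySem.List.pyGetD l i ' '))
        else st)
      ("", "")
    = (String.ofList (evoP l).1, String.ofList (evoP l).2) := by
  induction l using List.reverseRecOn with
  | nil => simp [PySem.List.pyRange_one_eq_nil, evoP]
  | append_singleton l c ih =>
      have hcast : ((l ++ [c]).length : ℤ) = (l.length : ℤ) + 1 := by
        simp [List.length_append]
      rw [hcast, PySem.List.pyRange_one_succ_right (by positivity), List.foldl_append]
      have hcongr :
          (PySem.List.pyRange 0 (l.length : Int) 1).foldl
            (fun (st : String × String) i =>
              if PySem.Int.mod i 2 = 0 ∧ PySem.List.pyGetD (l ++ [c]) i ' ' ≠ ' ' then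
                (st.1.push (PySem.List.pyGetD (l ++ [c]) i ' '), st.2)
              else if PySem.Int.mod i 2 = 1 ∧ PySem.List.pyGetD (l ++ [c]) i ' ' ≠ ' ' then
                (st.1, st.2.push (PySem.List.pyGetD (l ++ [c]) i ' '))
              else st)
            ("", "")
          = (PySem.List.pyRange 0 (l.length : Int) 1).foldl
            (fun (st : String × String) i =>
              if PySem.Int.mod i 2 = 0 ∧ PySem.List.pyGetD l i ' ' ≠ ' ' then
                (st.1.push (PySem.List.pyGetD l i ' '), st.2)
              else if PySem.Int.mod i 2 = 1 ∧ PySem.List.pyGetD l i ' ' ≠ ' ' then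
                (st.1, st.2.push (PySem.List.pyGetD l i ' '))
              else st)
            ("", "") := by
        apply PySem.List.foldl_congr_mem
        intro acc i hi
        rw [PySem.List.mem_pyRange_one] at hi
        have hget : PySem.List.pyGetD (l ++ [c]) i ' ' = PySem.List.pyGetD l i ' ' := by
          obtain ⟨k, rfl⟩ : ∃ k : ℕ, i = (k : ℤ) := ⟨i.toNat, (Int.toNat_of_nonneg hi.1).symm⟩
          have hk : k < l.length := by exact_mod_cast hi.2
          rw [PySem.List.pyGetD_natCast, PySem.List.pyGetD_natCast,
              List.getD_append _ _ _ _ hk]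
        rw [hget]
      rw [hcongr, ih]
      have hgetc : PySem.List.pyGetD (l ++ [c]) (l.length : ℤ) ' ' = c := by
        rw [PySem.List.pyGetD_natCast]
        simp [List.getD]
      simp only [List.foldl_cons, List.foldl_nil, hgetc, mod_cast_two, evoP_snoc]
      by_cases hp : l.length % 2 = 0
      · have hp' : l.length % 2 ≠ 1 := by omega
        by_cases hc : c = ' ' <;>
          simp [hp, hc, String.push, String.ofList]
      · have hp1 : l.length % 2 = 1 := by omega
        by_cases hc : c = ' ' <;>
          simp [hp1, hc, String.push, String.ofList]

-- ===== VERDICT (by name: the statement is the Claim_ definition above) =====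
theorem Eveodd_spec : Claim_equal_Eveodd := by
  intro a _
  show Eveodd a = Eveodd_alt a
  unfold Eveodd Eveodd_alt
  rw [foldA_eq, evoLoop_eq]
  simp
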